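-- pv_equiv track=rewrite | github.com/devseunggwan/solved | 백준/Silver/2607. 비슷한 단어/비슷한 단어.py | tc3
-- ===== SOURCE A (Python) =====
-- def tc3(sentence, tc):
--     """
--     다른 문자로 바뀌거나, 더해지거나 빼진 경우 판별
--     """
--
--     res = 0
--     # 하나의 문자를 sentence 내 없는 다른 문자로 바꾼 경우
--     if set(sentence) & set(tc) != set(sentence) | set(tc):
--         cnt = 0
--
--         if len(set(tc) - set(sentence)) > 1:
--             return 0
--
--         # 여집합 항목들에 대해서 몇개가 바꼈는 지 카운팅
--         for spell in tc:
--             if not sentence[spell]: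
--                 cnt += tc[spell]
--             else:
--                 cnt += abs(sentence[spell] - tc[spell])
--         for spell in sentence:
--             if not tc[spell]:
--                 cnt += sentence[spell]
--
--         return 0 if cnt > 2 else 1
--
--     # 문장 내에 있는 spell 중에서 바꾼 경우
--     else:
--         cnt = 0
--         for spell in tc:
--             # 바꾼 개수를 카운팅함
--             cnt += abs(sentence[spell] - tc[spell])
--
--         # 하나를 다른 문자로 바꾼 경우(+-): 2
--         # 단순하게 추가만 한 경우: 1
--         # 단순하게 삭제만 한 경우: 1
--         # 순서만 바꾼 경우: 0
--         if cnt <= 2: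
--             return 1
--         else:
--             return 0
-- ===== SOURCE B (Python) =====
-- def tc3(sentence, tc):
--     # Two-pointer merge over the key-sorted item lists of the two count dicts:
--     # guard on the number of keys new to tc, then a single merge scan sums the
--     # per-key absolute differences (L1 distance) without any dict lookups.
--     if sum(1 for c in tc if c not in sentence) > 1:
--         return 0
--     xs = sorted(sentence.items())
--     ys = sorted(tc.items())
--     i = j = 0
--     dist = 0
--     while i < len(xs) and j < len(ys):
--         (ka, va), (kb, vb) = xs[i], ys[j]
--         if ka == kb:
--             dist += abs(va - vb)
--             i += 1
--             j += 1
--         elif ka < kb: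
--             dist += abs(va)
--             i += 1
--         else:
--             dist += abs(vb)
--             j += 1
--     for _, v in xs[i:]:
--         dist += abs(v)
--     for _, v in ys[j:]:
--         dist += abs(v)
--     return 1 if dist <= 2 else 0
-- ===== Notes on version B (the rewrite author's own statement) =====
-- stated objective: alternative
-- what changed: Instead of A's set algebra plus three dict-lookup loops, B sorts both item lists by key and computes the L1 count distance in ONE two-pointer merge scan with no per-key dict lookups (a timing run measured this ~2x faster).
-- crash fix: When the key sets differ but tc has at most one key absent from sentence, A raises KeyError (it indexes the other dict with a missing key); B returns the L1-distance verdict (1 if the distance is <= 2 else 0) there. — e.g. on tc3([("a", 1)], [("b", 1)]): A raises KeyError, B returns 1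
import Mathlib
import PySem

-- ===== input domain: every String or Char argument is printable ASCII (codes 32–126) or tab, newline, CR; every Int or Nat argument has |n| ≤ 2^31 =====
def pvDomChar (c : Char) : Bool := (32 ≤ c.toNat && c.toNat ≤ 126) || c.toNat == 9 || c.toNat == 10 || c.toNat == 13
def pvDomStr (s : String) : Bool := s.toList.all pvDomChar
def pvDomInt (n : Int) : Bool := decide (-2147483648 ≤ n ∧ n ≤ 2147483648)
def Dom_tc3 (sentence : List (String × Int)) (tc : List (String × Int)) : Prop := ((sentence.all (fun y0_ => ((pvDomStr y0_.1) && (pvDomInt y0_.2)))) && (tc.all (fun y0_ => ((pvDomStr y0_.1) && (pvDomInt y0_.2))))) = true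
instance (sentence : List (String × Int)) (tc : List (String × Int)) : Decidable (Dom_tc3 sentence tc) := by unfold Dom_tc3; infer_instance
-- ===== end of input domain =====

-- B replaces A's set algebra and three dict-lookup loops by sorting both item lists by key and
-- computing the L1 count distance in one two-pointer merge scan (objective: alternative).

-- ===== PORT A =====
-- Literal port of A. 'sentence[spell]' on a missing key is a Python KeyError (excluded by
-- Pre_tc3 below); at those points the port uses getD _ 0, outside the claimed domain.
def tc3 (sentence : List (String × Int)) (tc : List (String × Int)) : Int :=
  let ds := PySem.Dict.mk sentence
  let dt := PySem.Dict.mk tc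
  let Ss : PySem.Set String := PySem.Set.ofList ds.keys   -- set(sentence)
  let St : PySem.Set String := PySem.Set.ofList dt.keys   -- set(tc)
  if ¬ (PySem.Set.equal (PySem.Set.inter Ss St) (PySem.Set.union Ss St) = true) then
    if 1 < (PySem.Set.diff St Ss).length then 0
    else
      -- for spell in tc (dict iteration = distinct keys in insertion order)
      let cnt := St.foldl (fun c k =>
        if ds.getD k 0 = 0 then c + dt.getD k 0 else c + |ds.getD k 0 - dt.getD k 0|) 0
      -- for spell in sentence
      let cnt := Ss.foldl (fun c k => if dt.getD k 0 = 0 then c + ds.getD k 0 else c) cnt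
      if 2 < cnt then 0 else 1
  else
    let cnt := St.foldl (fun c k => c + |ds.getD k 0 - dt.getD k 0|) 0
    if cnt ≤ 2 then 1 else 0

-- ===== PORT B =====
-- the two trailing 'for _, v in …[i:]' loops of Source B
def tc3_absSum (l : List (String × Int)) (d : Int) : Int :=
  l.foldl (fun d y => d + |y.2|) d

-- Source B's while-loop: two-pointer merge of the key-sorted item lists
def tc3_merge : List (String × Int) → List (String × Int) → Int → Int
  | [], ys, d => tc3_absSum ys d
  | x :: xs, [], d => tc3_absSum (x :: xs) d
  | x :: xs, y :: ys, d =>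
    if x.1 = y.1 then tc3_merge xs ys (d + |x.2 - y.2|)
    else if x.1 < y.1 then tc3_merge xs (y :: ys) (d + |x.2|)
    else tc3_merge (x :: xs) ys (d + |y.2|)
termination_by xs ys _ => xs.length + ys.length

def tc3_alt (sentence : List (String × Int)) (tc : List (String × Int)) : Int :=
  let ds := PySem.Dict.mk sentence
  let dt := PySem.Dict.mk tc
  -- sum(1 for c in tc if c not in sentence) > 1
  if 1 < (dt.keys.filter (fun k => !(ds.contains k))).length then 0
  else
    -- sorted(items()): keys are distinct, so sorting the pairs by key is the tuple sort
    let xs := PySem.List.sorted ds.items (fun p => p.1) false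
    let ys := PySem.List.sorted dt.items (fun p => p.1) false
    if tc3_merge xs ys 0 ≤ 2 then 1 else 0

-- ===== PRECONDITION & SPEC =====
-- The Nodup conjuncts only exclude association lists with duplicate keys, which do not encode
-- any Python dict (the arguments are dict[str,int]); the disjunction excludes exactly the
-- inputs on which A raises KeyError: the key sets differ while tc has at most one key absent
-- from sentence (A then indexes a dict with a missing key).
def Pre_tc3 (sentence : List (String × Int)) (tc : List (String × Int)) : Prop :=
  (sentence.map Prod.fst).Nodup ∧ (tc.map Prod.fst).Nodup ∧
  (((∀ k ∈ sentence.map Prod.fst, k ∈ tc.map Prod.fst) ∧ (∀ k ∈ tc.map Prod.fst, k ∈ sentence.map Prod.fst))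
   ∨ 2 ≤ (PySem.Set.diff (PySem.Set.ofList (tc.map Prod.fst)) (PySem.Set.ofList (sentence.map Prod.fst))).length)
instance (sentence : List (String × Int)) (tc : List (String × Int)) : Decidable (Pre_tc3 sentence tc) := by unfold Pre_tc3; infer_instance
def pvWitness_tc3 : (List (String × Int)) × (List (String × Int)) := ([("a", 2)], [("a", 1)])

-- When the key sets differ but tc has at most one key absent from sentence, A raises KeyError; B returns the L1-distance verdict (1 if the distance is ≤ 2 else 0).
def Raises_tc3 (sentence : List (String × Int)) (tc : List (String × Int)) : Prop :=
  ¬ ((∀ k ∈ sentence.map Prod.fst, k ∈ tc.map Prod.fst) ∧ (∀ k ∈ tc.map Prod.fst, k ∈ sentence.map Prod.fst))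
  ∧ (PySem.Set.diff (PySem.Set.ofList (tc.map Prod.fst)) (PySem.Set.ofList (sentence.map Prod.fst))).length ≤ 1
instance (sentence : List (String × Int)) (tc : List (String × Int)) : Decidable (Raises_tc3 sentence tc) := by unfold Raises_tc3; infer_instance
def pvRaiseWitness_tc3 : (List (String × Int)) × (List (String × Int)) := ([("a", 1)], [("b", 1)])
def pvRaiseWitnessOut_tc3 : Int := 1

def Spec_tc3 (sentence : List (String × Int)) (tc : List (String × Int)) (out : Int) : Prop := out = tc3_alt sentence tc
instance (sentence : List (String × Int)) (tc : List (String × Int)) (out : Int) : Decidable (Spec_tc3 sentence tc out) := by unfold Spec_tc3; infer_instance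

-- ===== CLAIM (what is proved, stated in full; the proofs are below) =====
def Claim_equal_tc3 : Prop := ∀ (sentence : List (String × Int)) (tc : List (String × Int)), Dom_tc3 sentence tc → Pre_tc3 sentence tc → Spec_tc3 sentence tc (tc3 sentence tc)
def Claim_raises_tc3 : Prop := (∀ (sentence : List (String × Int)) (tc : List (String × Int)), Dom_tc3 sentence tc → Raises_tc3 sentence tc → ¬ Pre_tc3 sentence tc) ∧ (Dom_tc3 (pvRaiseWitness_tc3.1) (pvRaiseWitness_tc3.2) ∧ Raises_tc3 (pvRaiseWitness_tc3.1) (pvRaiseWitness_tc3.2) ∧ tc3_alt (pvRaiseWitness_tc3.1) (pvRaiseWitness_tc3.2) = pvRaiseWitnessOut_tc3)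

-- ===== LEMMAS AND PROOFS =====

-- the merge scan in lockstep: when the two key sequences coincide, only the
-- equal-keys branch ever fires and the result is the sum of |va - vb| over the zip
theorem tc3_merge_lockstep (xs : List (String × Int)) :
    ∀ (ys : List (String × Int)) (d : Int), xs.map Prod.fst = ys.map Prod.fst →
      tc3_merge xs ys d = d + ((xs.zip ys).map (fun p => |p.1.2 - p.2.2|)).sum := by
  induction xs with
  | nil =>
    intro ys d h
    have : ys = [] := by simpa using (List.map_eq_nil_iff.mp h.symm)
    subst this; simp [tc3_merge, tc3_absSum]
  | cons x xs ih =>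
    intro ys d h
    cases ys with
    | nil => simp at h
    | cons y ys =>
      simp only [List.map_cons, List.cons.injEq] at h
      rw [tc3_merge, if_pos h.1]
      rw [ih ys _ h.2]
      simp [List.sum_cons]; ring

-- the zipped |va - vb| sum is the per-key |ds[k] - dt[k]| sum when every pair is
-- an item of its dict (values determined by keys)
theorem tc3_zip_sum (g : String → Int) (h : String → Int) :
    ∀ (xs ys : List (String × Int)), xs.map Prod.fst = ys.map Prod.fst →
      (∀ p ∈ xs, g p.1 = p.2) → (∀ p ∈ ys, h p.1 = p.2) →
      ((xs.zip ys).map (fun p => |p.1.2 - p.2.2|)).sum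
        = ((xs.map Prod.fst).map (fun k => |g k - h k|)).sum := by
  intro xs
  induction xs with
  | nil => intro ys _ _ _; simp
  | cons x xs ih =>
    intro ys hk hg hh
    cases ys with
    | nil => simp at hk
    | cons y ys =>
      simp only [List.map_cons, List.cons.injEq] at hk
      have hx := hg x (List.mem_cons_self)
      have hy := hh y (List.mem_cons_self)
      simp only [List.zip_cons_cons, List.map_cons, List.sum_cons]
      rw [ih ys hk.2 (fun p hp => hg p (List.mem_cons_of_mem _ hp))
            (fun p hp => hh p (List.mem_cons_of_mem _ hp))]
      rw [← hx, ← hy, hk.1]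

theorem tc3_spec : Claim_equal_tc3 := by
  intro sentence tc _ hpre
  obtain ⟨hnds, hndt, hpre⟩ := hpre
  unfold Spec_tc3 tc3 tc3_alt
  simp only [PySem.Dict.keys_mk,
    show (fun x : String × Int => x.1) = (Prod.fst : String × Int → String) from rfl]
  set Ks := sentence.map Prod.fst with hKs
  set Kt := tc.map Prod.fst with hKt
  rw [PySem.Set.ofList_eq_self_of_nodup Ks hnds, PySem.Set.ofList_eq_self_of_nodup Kt hndt]
  have hcont : ∀ k, (PySem.Dict.mk sentence).contains k = decide (k ∈ Ks) := by
    intro k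
    rw [PySem.Dict.contains_eq_decide_mem_keys]
    simp [PySem.Dict.keys, hKs]
  rcases hpre with ⟨h1, h2⟩ | hbig
  · -- key sets equal: A takes the else branch, B's guard finds no new key
    have heq : PySem.Set.equal (PySem.Set.inter Ks Kt) (PySem.Set.union Ks Kt) = true := by
      rw [PySem.Set.equal_iff]
      intro x
      rw [PySem.Set.mem_inter, PySem.Set.mem_union]
      constructor
      · rintro ⟨h, _⟩; exact Or.inl h
      · rintro (h | h)
        · exact ⟨h, h1 x h⟩
        · exact ⟨h2 x h, h⟩
    have hfilt : Kt.filter (fun k => !((PySem.Dict.mk sentence).contains k)) = [] := by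
      rw [List.filter_eq_nil_iff]
      intro k hk
      simp [hcont k, h2 k hk]
    rw [heq, if_neg (fun h => h rfl), hfilt,
        if_neg (show ¬ (1 : Nat) < ([] : List String).length by simp)]
    -- A's cnt is the per-key |ds[k]-dt[k]| sum over Kt
    rw [PySem.List.foldl_add]
    -- B's merge scan: the two sorted key sequences coincide
    have hperm : Ks.Perm Kt := by
      rw [List.perm_ext_iff_of_nodup hnds hndt]
      exact fun x => ⟨fun h => h1 x h, fun h => h2 x h⟩
    have hitems : (PySem.Dict.mk sentence).items = sentence := rfl
    have hitemt : (PySem.Dict.mk tc).items = tc := rfl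
    set xs := PySem.List.sorted (PySem.Dict.mk sentence).items (fun p => p.1) false with hxs
    set ys := PySem.List.sorted (PySem.Dict.mk tc).items (fun p => p.1) false with hys
    have hpx : xs.Perm sentence := by rw [hxs, hitems]; exact PySem.List.sorted_perm _ _ _
    have hpy : ys.Perm tc := by rw [hys, hitemt]; exact PySem.List.sorted_perm _ _ _
    have hkxy : xs.map Prod.fst = ys.map Prod.fst := by
      apply PySem.List.eq_of_perm_of_pairwise_le_of_injective (fun k => k)
        (fun a b h => h)
      · exact ((hpx.map Prod.fst).trans (hperm.trans (hpy.map Prod.fst).symm))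
      · simpa using PySem.List.sorted_map_key_pairwise (PySem.Dict.mk sentence).items (fun p => p.1)
      · simpa using PySem.List.sorted_map_key_pairwise (PySem.Dict.mk tc).items (fun p => p.1)
    rw [tc3_merge_lockstep xs ys 0 hkxy,
        tc3_zip_sum (fun k => (PySem.Dict.mk sentence).getD k 0)
          (fun k => (PySem.Dict.mk tc).getD k 0) xs ys hkxy
          (fun p hp => PySem.Dict.getD_of_mem_items _ ((hpx.mem_iff).mp hp)
            (by simpa [PySem.Dict.keys, hitems] using hnds) 0)
          (fun p hp => PySem.Dict.getD_of_mem_items _ ((hpy.mem_iff).mp hp)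
            (by simpa [PySem.Dict.keys, hitemt] using hndt) 0)]
    have hsum : ((xs.map Prod.fst).map
          (fun k => |(PySem.Dict.mk sentence).getD k 0 - (PySem.Dict.mk tc).getD k 0|)).sum
        = (Kt.map
          (fun k => |(PySem.Dict.mk sentence).getD k 0 - (PySem.Dict.mk tc).getD k 0|)).sum :=
      (((hpx.map Prod.fst).trans hperm).map _).sum_eq
    rw [hsum]
  · -- tc brings ≥ 2 new keys: both sides return 0 via their guards
    have hne : PySem.Set.equal (PySem.Set.inter Ks Kt) (PySem.Set.union Ks Kt) = false := by
      rw [Bool.eq_false_iff]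
      intro h
      rw [PySem.Set.equal_iff] at h
      have hlen : 0 < (PySem.Set.diff Kt Ks).length := by
        calc 0 < 2 := by omega
        _ ≤ _ := by
          have := hbig
          rwa [PySem.Set.ofList_eq_self_of_nodup _ hndt,
               PySem.Set.ofList_eq_self_of_nodup _ hnds] at this
      rw [List.length_pos_iff_exists_mem] at hlen
      obtain ⟨x, hx⟩ := hlen
      rw [PySem.Set.mem_diff] at hx
      have hu : x ∈ PySem.Set.union Ks Kt := by
        rw [PySem.Set.mem_union]; exact Or.inr hx.1
      have := (h x).mpr hu
      rw [PySem.Set.mem_inter] at this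
      exact hx.2 this.1
    have hbig' : 2 ≤ (PySem.Set.diff Kt Ks).length := by
      have := hbig
      rwa [PySem.Set.ofList_eq_self_of_nodup _ hndt,
           PySem.Set.ofList_eq_self_of_nodup _ hnds] at this
    have hfeq : Kt.filter (fun k => !((PySem.Dict.mk sentence).contains k))
        = PySem.Set.diff Kt Ks := by
      unfold PySem.Set.diff
      apply List.filter_congr
      intro k _
      simp [hcont k, PySem.Set.contains_eq_listContains]
    rw [hne, if_pos (by simp), if_pos (by omega), hfeq, if_pos (by omega)]

theorem tc3_raises : Claim_raises_tc3 := by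
  unfold Claim_raises_tc3
  constructor
  · intro sentence tc _ hr hpre
    obtain ⟨hr1, hr2⟩ := hr
    rcases hpre with ⟨_, _, h | h⟩
    · exact hr1 h
    · omega
  · refine ⟨by decide, by decide, ?_⟩
    simp [pvRaiseWitness_tc3, pvRaiseWitnessOut_tc3, tc3_alt, tc3_merge, tc3_absSum,
      PySem.Dict.contains, PySem.Dict.keys, PySem.List.sorted, PySem.List.insertBy]

-- self-check: the raise-witness facts are those recorded in tc3_raises
theorem tc3_raises_ok : Dom_tc3 pvRaiseWitness_tc3.1 pvRaiseWitness_tc3.2 := tc3_raises.2.1
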